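-- pv_equiv track=rewrite | github.com/sai-vishnu-arvind/oac-slack-bot | src/oac_slack_bot/slack/format.py | _convert_single_asterisk_italic
-- ===== SOURCE A (Python) =====
-- def _convert_single_asterisk_italic(text: str) -> str:
--     result: list[str] = []
--     chars = list(text)
--     i = 0
--
--     while i < len(chars):
--         if chars[i] == "*":
--             j = i + 1
--             while j < len(chars) and chars[j] != "*" and chars[j] != "\n":
--                 j += 1
--             if j < len(chars) and chars[j] == "*" and j > i + 1:
--                 result.append("_")
--                 result.extend(chars[i + 1 : j])
--                 result.append("_")
--                 i = j + 1
--             else: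
--                 result.append(chars[i])
--                 i += 1
--         else:
--             result.append(chars[i])
--             i += 1
--
--     return "".join(result)
-- ===== SOURCE B (Python) =====
-- def _convert_single_asterisk_italic(text: str) -> str:
--     segs = text.split("*")
--     out = [segs[0]]
--     k = 1
--     n = len(segs)
--     while k < n:
--         if k + 1 < n and segs[k] and "\n" not in segs[k]:
--             out.append("_" + segs[k] + "_" + segs[k + 1])
--             k += 2
--         else:
--             out.append("*" + segs[k])
--             k += 1
--     return "".join(out)
-- ===== Notes on version B (the rewrite author's own statement) =====
-- stated objective: simpler
-- what changed: A's index-juggling while-loop scanner (manual inner scan for the closing asterisk plus explicit i/j bookkeeping over a char list) is replaced by splitting the text on the asterisk once and re-joining the segments pairwise: a segment between two stars that is non-empty and newline-free becomes an underscore-wrapped span, otherwise the star is kept literally.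
import Mathlib
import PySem

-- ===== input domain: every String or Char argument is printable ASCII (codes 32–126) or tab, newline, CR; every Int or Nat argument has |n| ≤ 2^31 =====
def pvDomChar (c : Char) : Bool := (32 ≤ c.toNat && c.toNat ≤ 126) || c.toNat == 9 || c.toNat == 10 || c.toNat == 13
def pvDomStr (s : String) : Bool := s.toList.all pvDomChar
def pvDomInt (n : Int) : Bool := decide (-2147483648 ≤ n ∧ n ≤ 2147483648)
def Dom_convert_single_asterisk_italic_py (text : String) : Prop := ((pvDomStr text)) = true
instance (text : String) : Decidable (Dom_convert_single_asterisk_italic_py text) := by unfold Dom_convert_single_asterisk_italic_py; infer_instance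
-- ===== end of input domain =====

-- B replaces A's index-juggling while-loop scanner by splitting the text on '*' once and
-- re-joining the segments pairwise (objective: simpler).

-- ===== PORT A =====
-- A's outer while loop over index i, as recursion on the remaining character list;
-- the inner `while j < len and chars[j] != '*' and chars[j] != '\n'` scan is the takeWhile,
-- `rest.drop inner.length` is position j onward, the condition mirrors
-- `j < len(chars) and chars[j] == '*' and j > i + 1`.
def aScan : List Char → List Char
  | [] => []
  | c :: rest =>
    if c = '*' then
      let inner := rest.takeWhile (fun d => d != '*' && d != '\n')
      if (rest.drop inner.length) ≠ [] ∧ (rest.drop inner.length).head? = some '*' ∧ inner ≠ [] then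
        '_' :: (inner ++ '_' :: aScan (rest.drop inner.length).tail)
      else
        c :: aScan rest
    else
      c :: aScan rest
termination_by l => l.length
decreasing_by
  · simp only [List.length_tail, List.length_drop, List.length_cons]; omega
  · simp only [List.length_cons]; omega
  · simp only [List.length_cons]; omega

def convert_single_asterisk_italic_py (text : String) : String :=
  String.mk (aScan text.toList)

-- ===== PORT B =====
-- Source B's while loop over k (from 1) through segs = text.split('*'), as recursion on segs[1:];
-- the two-cons pattern is `k + 1 < n`, the first branch appends '_'+segs[k]+'_'+segs[k+1] (k += 2),
-- the second appends '*'+segs[k] (k += 1).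
def bJoin : List (List Char) → List Char
  | [] => []
  | [s] => '*' :: s
  | s :: t :: rest =>
    if s ≠ [] ∧ '\n' ∉ s then '_' :: (s ++ '_' :: (t ++ bJoin rest))
    else '*' :: (s ++ bJoin (t :: rest))

def convert_single_asterisk_italic_py_alt (text : String) : String :=
  let segs := text.toList.splitOn '*'
  String.mk (segs.headI ++ bJoin segs.tail)

-- ===== PRECONDITION & SPEC =====
def Spec_convert_single_asterisk_italic_py (text : String) (out : String) : Prop := out = convert_single_asterisk_italic_py_alt text
instance (text : String) (out : String) : Decidable (Spec_convert_single_asterisk_italic_py text out) := by unfold Spec_convert_single_asterisk_italic_py; infer_instance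

-- ===== CLAIM (what is proved, stated in full; the proofs are below) =====
def Claim_equal_convert_single_asterisk_italic_py : Prop := ∀ (text : String), Dom_convert_single_asterisk_italic_py text → Spec_convert_single_asterisk_italic_py text (convert_single_asterisk_italic_py text)

-- ===== LEMMAS AND PROOFS =====

lemma split_struct : ∀ (cs : List Char) (h : List Char) (t : List (List Char)),
    cs.splitOnP (· == '*') = h :: t →
    (∀ x ∈ h, x ≠ '*') ∧
      ((t = [] ∧ cs = h) ∨ ∃ r', cs = h ++ '*' :: r' ∧ r'.splitOnP (· == '*') = t) := by
  intro cs
  induction cs with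
  | nil =>
    intro h t hsplit
    rw [List.splitOnP_nil] at hsplit
    obtain ⟨rfl, rfl⟩ := List.cons.inj hsplit
    exact ⟨by simp, Or.inl ⟨rfl, rfl⟩⟩
  | cons c cs ih =>
    intro h t hsplit
    rw [List.splitOnP_cons] at hsplit
    by_cases hc : c = '*'
    · subst hc
      simp only [beq_self_eq_true, if_pos] at hsplit
      obtain ⟨rfl, rfl⟩ := List.cons.inj hsplit
      exact ⟨by simp, Or.inr ⟨cs, rfl, rfl⟩⟩
    · rcases e : cs.splitOnP (· == '*') with _ | ⟨h0, t0⟩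
      · exact absurd e (List.splitOnP_ne_nil _ _)
      · rw [if_neg (by simp [hc]), e] at hsplit
        simp only [List.modifyHead] at hsplit
        obtain ⟨rfl, rfl⟩ := List.cons.inj hsplit
        obtain ⟨hfree, hrest⟩ := ih h0 t0 e
        refine ⟨by simpa [hc] using hfree, ?_⟩
        rcases hrest with ⟨rfl, rfl⟩ | ⟨r', rfl, hr⟩
        · exact Or.inl ⟨rfl, rfl⟩
        · exact Or.inr ⟨r', rfl, hr⟩

lemma aScan_cons_star (rest : List Char) : aScan ('*' :: rest) =
    (if (rest.drop (rest.takeWhile (fun d => d != '*' && d != '\n')).length) ≠ [] ∧ (rest.drop (rest.takeWhile (fun d => d != '*' && d != '\n')).length).head? = some '*' ∧ (rest.takeWhile (fun d => d != '*' && d != '\n')) ≠ [] then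
        '_' :: ((rest.takeWhile (fun d => d != '*' && d != '\n')) ++ '_' :: aScan (rest.drop (rest.takeWhile (fun d => d != '*' && d != '\n')).length).tail)
      else
        '*' :: aScan rest) := by
  rw [aScan]; rfl

lemma aScan_cons_ne (c : Char) (rest : List Char) (hc : ¬ c = '*') :
    aScan (c :: rest) = c :: aScan rest := by
  rw [aScan, if_neg hc]

lemma drop_takeWhile_length (q : Char → Bool) (l : List Char) :
    l.drop (l.takeWhile q).length = l.dropWhile q := by
  nth_rewrite 2 [← List.takeWhile_append_dropWhile (p := q) (l := l)]
  rw [List.drop_left]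

lemma main_lemma : ∀ (n : Nat) (cs : List Char), cs.length ≤ n →
    ∀ (h : List Char) (t : List (List Char)), cs.splitOnP (· == '*') = h :: t →
    aScan cs = h ++ bJoin t := by
  intro n
  induction n with
  | zero =>
    intro cs hlen h t hsplit
    have : cs = [] := List.length_eq_zero_iff.mp (Nat.le_zero.mp hlen)
    subst this
    rw [List.splitOnP_nil] at hsplit
    obtain ⟨rfl, rfl⟩ := List.cons.inj hsplit
    simp [aScan, bJoin]
  | succ n ih =>
    intro cs hlen h t hsplit
    match cs with
    | [] =>
      rw [List.splitOnP_nil] at hsplit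
      obtain ⟨rfl, rfl⟩ := List.cons.inj hsplit
      simp [aScan, bJoin]
    | c :: rest =>
      have hlen' : rest.length ≤ n := by simpa using hlen
      by_cases hc : c = '*'
      · subst hc
        rw [List.splitOnP_cons, if_pos (by simp)] at hsplit
        obtain ⟨rfl, hT⟩ := List.cons.inj hsplit
        rcases e : rest.splitOnP (· == '*') with _ | ⟨h', t'⟩
        · exact absurd e (List.splitOnP_ne_nil _ _)
        rw [e] at hT; subst hT
        obtain ⟨hfree, hstr⟩ := split_struct rest h' t' e
        rw [aScan_cons_star]
        rcases hstr with ⟨rfl, rfl⟩ | ⟨r', rfl, hr⟩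
        · -- no star in rest
          have hcond : ¬ ((rest.drop (rest.takeWhile (fun d => d != '*' && d != '\n')).length) ≠ [] ∧ (rest.drop (rest.takeWhile (fun d => d != '*' && d != '\n')).length).head? = some '*' ∧ (rest.takeWhile (fun d => d != '*' && d != '\n')) ≠ []) := by
            rw [drop_takeWhile_length]
            rcases edw : rest.dropWhile (fun d => d != '*' && d != '\n') with _ | ⟨d, r2⟩
            · simp
            · have hqd : (fun d => d != '*' && d != '\n') d = false := by
                have := List.head_dropWhile_not (fun d => d != '*' && d != '\n') (l := rest) (by rw [edw]; simp)
                simpa [edw] using this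
              have hdmem : d ∈ rest := (List.dropWhile_suffix _).subset (by rw [edw]; simp)
              have : d ≠ '*' := hfree d hdmem
              have hdn : d = '\n' := by
                simp only [Bool.and_eq_false_iff, bne_eq_false_iff_eq] at hqd
                tauto
              intro ⟨_, hhead, _⟩
              rw [hdn] at hhead
              simp at hhead
          rw [if_neg hcond]
          have := ih rest hlen' rest [] e
          simp [this, bJoin]
        · -- rest = h' ++ '*' :: r'
          by_cases hh : h' ≠ [] ∧ '\n' ∉ h'
          · have hq : ∀ x ∈ h', (fun d => d != '*' && d != '\n') x = true := by
              intro x hx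
              simp only [Bool.and_eq_true, bne_iff_ne, ne_eq]
              exact ⟨hfree x hx, fun hxx => hh.2 (hxx ▸ hx)⟩
            have hinner : (h' ++ '*' :: r').takeWhile (fun d => d != '*' && d != '\n') = h' := by
              rw [List.takeWhile_append_of_pos hq, List.takeWhile_cons_of_neg (by simp)]
              simp
            have hdrop : (h' ++ '*' :: r').drop ((h' ++ '*' :: r').takeWhile (fun d => d != '*' && d != '\n')).length = '*' :: r' := by
              rw [hinner, List.drop_left]
            rw [hdrop, hinner, if_pos ⟨by simp, by simp, hh.1⟩]
            rcases e' : r'.splitOnP (· == '*') with _ | ⟨h'', t''⟩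
            · exact absurd e' (List.splitOnP_ne_nil _ _)
            rw [e'] at hr; subst hr
            have hlr : r'.length ≤ n := by
              have := hlen'
              simp only [List.length_append, List.length_cons] at this
              omega
            have := ih r' hlr h'' t'' e'
            simp only [List.tail_cons, this, bJoin, if_pos hh]
            simp
          · -- else branch on both sides
            have hcond : ¬ (((h' ++ '*' :: r').drop ((h' ++ '*' :: r').takeWhile (fun d => d != '*' && d != '\n')).length) ≠ [] ∧ ((h' ++ '*' :: r').drop ((h' ++ '*' :: r').takeWhile (fun d => d != '*' && d != '\n')).length).head? = some '*' ∧ ((h' ++ '*' :: r').takeWhile (fun d => d != '*' && d != '\n')) ≠ []) := by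
              push_neg at hh
              by_cases h0 : h' = []
              · subst h0
                simp only [List.nil_append]
                rw [List.takeWhile_cons_of_neg (by simp)]
                intro ⟨_, _, hne⟩
                exact hne rfl
              · have hnl : '\n' ∈ h' := hh h0
                rw [drop_takeWhile_length]
                have hdwne : h'.dropWhile (fun d => d != '*' && d != '\n') ≠ [] := by
                  rw [Ne, List.dropWhile_eq_nil_iff]
                  push_neg
                  exact ⟨'\n', hnl, by simp⟩
                rcases edw : h'.dropWhile (fun d => d != '*' && d != '\n') with _ | ⟨d, r2⟩
                · exact absurd edw hdwne
                · have hqd : (fun d => d != '*' && d != '\n') d = false := by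
                    have := List.head_dropWhile_not (fun d => d != '*' && d != '\n') (l := h') hdwne
                    simpa [edw] using this
                  have hdmem : d ∈ h' := (List.dropWhile_suffix _).subset (by rw [edw]; simp)
                  have hdn : d = '\n' := by
                    have : d ≠ '*' := hfree d hdmem
                    simp only [Bool.and_eq_false_iff, bne_eq_false_iff_eq] at hqd
                    tauto
                  rw [List.dropWhile_append, edw]
                  simp only [List.isEmpty_cons]
                  intro ⟨_, hhead, _⟩
                  rw [hdn] at hhead
                  simp at hhead
            rw [if_neg hcond]
            rw [ih (h' ++ '*' :: r') hlen' h' t' e]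
            rcases t' with _ | ⟨x, xs⟩
            · simp [bJoin]
            · simp [bJoin, if_neg hh]
      · rcases e : rest.splitOnP (· == '*') with _ | ⟨h0, t0⟩
        · exact absurd e (List.splitOnP_ne_nil _ _)
        rw [List.splitOnP_cons, if_neg (by simp [hc]), e] at hsplit
        simp only [List.modifyHead] at hsplit
        obtain ⟨rfl, rfl⟩ := List.cons.inj hsplit
        rw [aScan_cons_ne c rest hc, ih rest hlen' h0 t0 e]
        simp

-- ===== VERDICT (by name: the statement is the Claim_ definition above) =====
theorem convert_single_asterisk_italic_py_spec : Claim_equal_convert_single_asterisk_italic_py := by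
  intro text _
  unfold Spec_convert_single_asterisk_italic_py convert_single_asterisk_italic_py convert_single_asterisk_italic_py_alt
  obtain ⟨h, t, hsplit⟩ : ∃ h t, text.toList.splitOnP (· == '*') = h :: t := by
    rcases e : text.toList.splitOnP (· == '*') with _ | ⟨h, t⟩
    · exact absurd e (List.splitOnP_ne_nil _ _)
    · exact ⟨h, t, rfl⟩
  have : text.toList.splitOn '*' = h :: t := hsplit
  simp only [this, List.headI, List.tail]
  rw [main_lemma text.toList.length text.toList le_rfl h t hsplit]
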